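-- pv_equiv track=rewrite | github.com/charlescohanlon/kan_inr | match_params.py | siren_params
-- ===== SOURCE A (Python) =====
-- def siren_params(
--     n_input_dims, n_output_dims, n_hidden_layers, n_neurons, is_residual=False
-- ):
--     """Parameter count for FieldNet (SIREN). Always uses bias.
--
--     Non-residual SIREN:
--       - Each layer: (in + 1) * out  (weight + bias)
--
--     Residual SIREN:
--       - First layer: (d_in + 1) * n_neurons  (SineLayer)
--       - Hidden layers: 2 * (n_neurons + 1) * n_neurons  (ResidualSineLayer with two nn.Linear)
--       - Last layer: (n_neurons + 1) * d_out  (nn.Linear with bias)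
--     """
--     layers = [n_input_dims] + [n_neurons] * n_hidden_layers + [n_output_dims]
--     n_layers = len(layers) - 1  # number of layer transitions
--
--     total = 0
--     for ndx in range(n_layers):
--         layer_in = layers[ndx]
--         layer_out = layers[ndx + 1]
--
--         if ndx != n_layers - 1:
--             if not is_residual:
--                 # SineLayer: nn.Linear with bias
--                 total += (layer_in + 1) * layer_out
--             else:
--                 if ndx == 0:
--                     # First layer: SineLayer
--                     total += (layer_in + 1) * layer_out
--                 else:
--                     # ResidualSineLayer: two nn.Linear(features, features, bias=True)
--                     total += 2 * ((layer_in + 1) * layer_in)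
--         else:
--             # Final nn.Linear with bias
--             total += (layer_in + 1) * layer_out
--
--     return total
-- ===== SOURCE B (Python) =====
-- def siren_params(
--     n_input_dims, n_output_dims, n_hidden_layers, n_neurons, is_residual=False
-- ):
--     """Closed-form parameter count (O(1)): first layer + identical hidden
--     transitions counted at once + final layer."""
--     h = max(n_hidden_layers, 0)
--     if h == 0:
--         return (n_input_dims + 1) * n_output_dims
--     mid = (n_neurons + 1) * n_neurons
--     if is_residual:
--         mid *= 2
--     return (
--         (n_input_dims + 1) * n_neurons
--         + (h - 1) * mid
--         + (n_neurons + 1) * n_output_dims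
--     )
-- ===== Notes on version B (the rewrite author's own statement) =====
-- stated objective: faster
-- what changed: Replaced the per-transition loop over the built layer list with a closed-form formula: first-layer term + (h-1) copies of the identical hidden-transition term + final-layer term.
import Mathlib
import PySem

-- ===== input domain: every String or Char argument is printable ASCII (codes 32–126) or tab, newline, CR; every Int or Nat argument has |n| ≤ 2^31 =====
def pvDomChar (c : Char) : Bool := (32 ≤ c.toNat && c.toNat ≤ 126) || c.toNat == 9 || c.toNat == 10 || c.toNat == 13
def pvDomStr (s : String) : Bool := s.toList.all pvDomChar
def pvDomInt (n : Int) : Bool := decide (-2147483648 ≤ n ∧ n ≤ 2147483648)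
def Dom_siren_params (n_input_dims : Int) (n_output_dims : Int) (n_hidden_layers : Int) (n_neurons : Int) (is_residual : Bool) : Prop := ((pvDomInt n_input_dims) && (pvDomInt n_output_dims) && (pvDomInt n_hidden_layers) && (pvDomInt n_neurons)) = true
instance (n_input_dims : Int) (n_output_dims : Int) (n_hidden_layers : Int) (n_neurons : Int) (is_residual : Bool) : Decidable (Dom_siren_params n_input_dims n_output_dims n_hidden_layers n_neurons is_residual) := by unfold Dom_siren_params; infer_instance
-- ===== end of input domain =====

-- B replaces A's per-transition loop with a closed-form formula (objective: faster, O(1) vs O(n_hidden_layers)).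


-- ===== PORT A =====
def siren_params (n_input_dims : Int) (n_output_dims : Int) (n_hidden_layers : Int) (n_neurons : Int) (is_residual : Bool) : Int :=
  -- Python lists are arrays with O(1) indexing, so 'layers' is an Array;
  -- every index ndx drawn from range(n_layers) is nonnegative, so '.toNat' is exact here.
  let layers : Array Int := #[n_input_dims] ++ Array.replicate n_hidden_layers.toNat n_neurons ++ #[n_output_dims]
  let n_layers : Int := (layers.size : Int) - 1
  (PySem.List.pyRange 0 n_layers 1).foldl (fun total ndx =>
    let layer_in := layers.getD ndx.toNat 0
    let layer_out := layers.getD (ndx + 1).toNat 0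
    if ndx ≠ n_layers - 1 then
      if !is_residual then
        total + (layer_in + 1) * layer_out
      else
        if ndx = 0 then
          total + (layer_in + 1) * layer_out
        else
          total + 2 * ((layer_in + 1) * layer_in)
    else
      total + (layer_in + 1) * layer_out) 0

-- ===== PORT B =====
def siren_params_alt (n_input_dims : Int) (n_output_dims : Int) (n_hidden_layers : Int) (n_neurons : Int) (is_residual : Bool) : Int :=
  let h : Int := max n_hidden_layers 0
  if h = 0 then
    (n_input_dims + 1) * n_output_dims
  else
    let mid0 := (n_neurons + 1) * n_neurons
    let mid := if is_residual then mid0 * 2 else mid0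
    (n_input_dims + 1) * n_neurons + (h - 1) * mid + (n_neurons + 1) * n_output_dims

-- ===== PRECONDITION & SPEC =====
def Spec_siren_params (n_input_dims : Int) (n_output_dims : Int) (n_hidden_layers : Int) (n_neurons : Int) (is_residual : Bool) (out : Int) : Prop := out = siren_params_alt n_input_dims n_output_dims n_hidden_layers n_neurons is_residual
instance (n_input_dims : Int) (n_output_dims : Int) (n_hidden_layers : Int) (n_neurons : Int) (is_residual : Bool) (out : Int) : Decidable (Spec_siren_params n_input_dims n_output_dims n_hidden_layers n_neurons is_residual out) := by unfold Spec_siren_params; infer_instance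

-- ===== CLAIM (what is proved, stated in full; the proofs are below) =====
def Claim_equal_siren_params : Prop := ∀ (n_input_dims : Int) (n_output_dims : Int) (n_hidden_layers : Int) (n_neurons : Int) (is_residual : Bool), Dom_siren_params n_input_dims n_output_dims n_hidden_layers n_neurons is_residual → Spec_siren_params n_input_dims n_output_dims n_hidden_layers n_neurons is_residual (siren_params n_input_dims n_output_dims n_hidden_layers n_neurons is_residual)

-- ===== LEMMAS AND PROOFS =====

-- value of layers[j] for the concrete layer list
theorem pv_getD_layers (ni ne no : Int) (k j : ℕ) :
    (([ni] ++ List.replicate k ne ++ [no]) : List Int).getD j 0 =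
      if j = 0 then ni else if j ≤ k then ne else if j = k + 1 then no else 0 := by
  simp only [List.singleton_append, List.getD_eq_getElem?_getD]
  rcases j with _ | j
  · simp
  · simp only [List.getElem?_cons_succ, List.getElem?_append, 
      List.getElem?_replicate, List.getElem?_singleton]
    by_cases hj : j < k
    · have h1 : j + 1 ≤ k := by omega
      simp [hj, h1]
    · by_cases hk : j = k
      · subst hk
        simp
      · have h1 : ¬ (j - k = 0) := by omega
        have h2 : ¬ (j + 1 ≤ k) := by omega
        have h3 : ¬ (j + 1 = k + 1) := by omega
        simp [h1, h2, hk]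

-- the loop-body contribution at index ndx (k = number of hidden layers)
theorem pv_getD_arr (ni ne no : Int) (k j : ℕ) :
    (#[ni] ++ Array.replicate k ne ++ #[no]).getD j 0
      = (([ni] ++ List.replicate k ne ++ [no]) : List Int).getD j 0 := by
  have h : (#[ni] ++ Array.replicate k ne ++ #[no])
      = (([ni] ++ List.replicate k ne ++ [no]) : List Int).toArray := by
    simp
  rw [h]
  simp only [Array.getD, List.getD_eq_getElem?_getD, List.size_toArray]
  split
  · next hlt =>
    rw [List.getElem?_eq_getElem (by simpa using hlt)]
    simp
  · next hge =>
    rw [List.getElem?_eq_none (by simpa using hge)]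
    rfl

def pv_c (ni no ne : Int) (res : Bool) (k : ℕ) (ndx : Int) : Int :=
  let layers : Array Int := #[ni] ++ Array.replicate k ne ++ #[no]
  let layer_in := layers.getD ndx.toNat 0
  let layer_out := layers.getD (ndx + 1).toNat 0
  if ndx ≠ (k : Int) + 1 - 1 then
    if !res then (layer_in + 1) * layer_out
    else if ndx = 0 then (layer_in + 1) * layer_out
    else 2 * ((layer_in + 1) * layer_in)
  else (layer_in + 1) * layer_out

theorem pv_c_eval (ni no ne : Int) (res : Bool) (k j : ℕ) (hj : j ≤ k) :
    pv_c ni no ne res k (j : Int) =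
      if j ≠ k then
        (if j = 0 then (ni + 1) * ne
         else if res then 2 * ((ne + 1) * ne) else (ne + 1) * ne)
      else (if k = 0 then (ni + 1) * no else (ne + 1) * no) := by
  have hcast : ((j : Int) + 1) = ((j + 1 : ℕ) : Int) := by push_cast; ring
  unfold pv_c
  simp only [hcast, Int.toNat_natCast, pv_getD_arr, pv_getD_layers]
  by_cases hjk : j = k
  · subst hjk
    rcases Nat.eq_zero_or_pos j with h0 | h0
    · subst h0; simp
    · have c1 : ¬ ((j : Int) ≠ (j : Int) + 1 - 1) := by omega
      have c2 : ¬ (j = 0) := by omega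
      have c4 : ¬ (j + 1 ≤ j) := by omega
      simp [c2, c4]
  · have hlt : j < k := by omega
    have c1 : (j : Int) ≠ (k : Int) + 1 - 1 := by omega
    rcases Nat.eq_zero_or_pos j with h0 | h0
    · subst h0
      have c2 : (1 : ℕ) ≤ k := hlt
      have c3 : ¬ (k = 0) := by omega
      cases res <;> simp [c2, hjk]
    · have c2 : ¬ (j = 0) := by omega
      have c4 : j + 1 ≤ k := by omega
      have c5 : ¬ ((j : Int) = 0) := by omega
      cases res <;> simp [c2, hj, c4, hjk]

-- partial sums of the per-transition contributions, middle region
theorem pv_sum_mid (first mid last : Int) (k m : ℕ) (h1 : 1 ≤ m) (h2 : m ≤ k) :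
    ((List.range m).map
        (fun j => if j ≠ k then (if j = 0 then first else mid) else last)).sum
      = first + ((m : Int) - 1) * mid := by
  induction m with
  | zero => omega
  | succ n ih =>
    rcases Nat.eq_or_lt_of_le h1 with h | h
    · simp [← h]
      omega
    · have hn1 : 1 ≤ n := by omega
      rw [List.range_succ, List.map_append, List.sum_append, ih hn1 (by omega)]
      have hnk : n ≠ k := by omega
      have hn0 : n ≠ 0 := by omega
      simp [hnk, hn0]
      ring

theorem pv_sum_contrib (first mid last : Int) (k : ℕ) (hk : 1 ≤ k) :
    ((List.range (k + 1)).map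
        (fun j => if j ≠ k then (if j = 0 then first else mid) else last)).sum
      = first + ((k : Int) - 1) * mid + last := by
  rw [List.range_succ, List.map_append, List.sum_append, pv_sum_mid first mid last k k hk le_rfl]
  simp

-- ===== VERDICT (by name: the statement is the Claim_ definition above) =====
theorem siren_params_spec : Claim_equal_siren_params := by
  intro ni no h ne res _
  unfold Spec_siren_params siren_params siren_params_alt
  set k : ℕ := h.toNat with hk
  have hmax : max h 0 = (k : Int) := by omega
  have hlen : (((#[ni] ++ Array.replicate k ne ++ #[no]) : Array Int).size : Int) - 1 = (k : Int) + 1 := by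
    simp
  simp only [hlen, hmax]
  have hbody : (PySem.List.pyRange 0 ((k : Int) + 1) 1).foldl
      (fun total ndx =>
        let layer_in := (#[ni] ++ Array.replicate k ne ++ #[no] : Array Int).getD ndx.toNat 0
        let layer_out := (#[ni] ++ Array.replicate k ne ++ #[no] : Array Int).getD (ndx + 1).toNat 0
        if ndx ≠ (k : Int) + 1 - 1 then
          if !res then total + (layer_in + 1) * layer_out
          else if ndx = 0 then total + (layer_in + 1) * layer_out
          else total + 2 * ((layer_in + 1) * layer_in)
        else total + (layer_in + 1) * layer_out) 0
      = (PySem.List.pyRange 0 ((k : Int) + 1) 1).foldl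
          (fun total ndx => total + pv_c ni no ne res k ndx) 0 := by
    congr 1
    funext t i
    unfold pv_c
    split_ifs <;> rfl
  rw [hbody, PySem.List.foldl_add,
    show ((k : Int) + 1) = ((k + 1 : ℕ) : Int) by push_cast; ring,
    PySem.List.pyRange_zero_natCast, List.map_map]
  have hmapc : (List.range (k + 1)).map (pv_c ni no ne res k ∘ fun (j : ℕ) => (j : Int))
      = (List.range (k + 1)).map
          (fun j => if j ≠ k then
              (if j = 0 then (ni + 1) * ne
               else if res then 2 * ((ne + 1) * ne) else (ne + 1) * ne)
            else (if k = 0 then (ni + 1) * no else (ne + 1) * no)) := by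
    apply List.map_congr_left
    intro j hj
    have hjk : j ≤ k := by simpa using Nat.lt_succ_iff.mp (List.mem_range.mp hj)
    simp only [Function.comp]
    exact pv_c_eval ni no ne res k j hjk
  rw [hmapc]
  rcases Nat.eq_zero_or_pos k with h0 | h0
  · simp [h0]
  · rw [pv_sum_contrib _ _ _ k h0]
    rw [if_neg (by omega : ¬ ((k : Int) = 0)), if_neg (by omega : ¬ (k = 0))]
    cases res <;> simp only [Bool.false_eq_true, ite_false, ite_true, zero_add] <;> ring
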